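-- pv_equiv track=rewrite | github.com/seulgi-mun/Algorithm | Python/Programmers/숨어있는 숫자의 덧셈 (2).py | solution
-- ===== SOURCE A (Python) =====
-- def solution(my_string):
--     answer = 0
--
--     tmp = ''
--     num = []
--
--     for i in my_string:
--         if i.isdigit():
--             tmp += i
--         elif i.isdigit() == False:
--             if tmp != '':
--                 num.append(tmp)
--                 tmp = ''
--     if tmp:
--         num.append(tmp)
--
--     for i in num:
--         answer += int(i)
--
--     return answer
-- ===== SOURCE B (Python) =====
-- def solution(my_string):
--     normalized = ''.join(c if c.isdigit() else ' ' for c in my_string)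
--     return sum(int(piece) for piece in normalized.split())
-- ===== Notes on version B (the rewrite author's own statement) =====
-- stated objective: simpler
-- what changed: Replaces A's manual tmp-accumulator state machine with a trailing flush by masking every non-digit character to a space and using str.split() plus a one-line sum.
import Mathlib
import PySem

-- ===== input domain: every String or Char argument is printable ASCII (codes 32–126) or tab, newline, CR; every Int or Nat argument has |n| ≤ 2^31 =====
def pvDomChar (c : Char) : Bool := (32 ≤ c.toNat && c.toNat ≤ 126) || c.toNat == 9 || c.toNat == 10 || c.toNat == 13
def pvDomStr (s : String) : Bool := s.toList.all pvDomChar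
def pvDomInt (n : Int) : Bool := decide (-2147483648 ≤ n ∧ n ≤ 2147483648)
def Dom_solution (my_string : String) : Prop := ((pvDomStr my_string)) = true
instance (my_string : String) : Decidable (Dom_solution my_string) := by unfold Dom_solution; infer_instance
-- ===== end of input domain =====

-- B replaces A's manual tmp-accumulator state machine by mask-to-spaces + split() + sum (objective: simpler).


-- ===== PORT A =====
-- A's character loop: state (tmp, num) exactly as in the Python.
def solutionLoop : List Char → List Char → List (List Char) → List Char × List (List Char)
  | [], tmp, num => (tmp, num)
  | c :: rest, tmp, num =>
    if PySem.Chars.isdigit c then solutionLoop rest (tmp ++ [c]) num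
    else if tmp ≠ [] then solutionLoop rest [] (num ++ [tmp])
    else solutionLoop rest tmp num

-- int(i): on Dom every group is a nonempty run of '0'-'9', so ofChars? is always `some`; getD 0 is never taken.
def solution (my_string : String) : Int :=
  let st := solutionLoop my_string.toList [] []
  let num := if st.1 ≠ [] then st.2 ++ [st.1] else st.2
  num.foldl (fun answer i => answer + (PySem.Int.ofChars? i).getD 0) 0

-- ===== PORT B =====
def solution_alt (my_string : String) : Int :=
  let normalized := my_string.toList.map (fun c => if PySem.Chars.isdigit c then c else ' ')
  ((PySem.Chars.split₀ normalized).map (fun piece => (PySem.Int.ofChars? piece).getD 0)).sum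

-- ===== PRECONDITION & SPEC =====
def Spec_solution (my_string : String) (out : Int) : Prop := out = solution_alt my_string
instance (my_string : String) (out : Int) : Decidable (Spec_solution my_string out) := by unfold Spec_solution; infer_instance

-- ===== CLAIM (what is proved, stated in full; the proofs are below) =====
def Claim_equal_solution : Prop := ∀ (my_string : String), Dom_solution my_string → Spec_solution my_string (solution my_string)

-- ===== LEMMAS AND PROOFS =====

theorem isdigit_not_isspace (c : Char) (h : PySem.Chars.isdigit c = true) :
    PySem.Chars.isspace c = false := by
  simp [PySem.Chars.isdigit] at h
  have h0 : 48 ≤ c.toNat := h.1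
  have h9 : c.toNat ≤ 57 := h.2
  simp [PySem.Chars.isspace]
  omega

theorem isspace_space : PySem.Chars.isspace ' ' = true := by decide

-- A's flushed group list equals split₀ of the masked string (go's cur/acc are the reverses of tmp/num).
theorem loop_eq_go (cs : List Char) : ∀ (tmp : List Char) (num : List (List Char)),
    (let st := solutionLoop cs tmp num
     if st.1 ≠ [] then st.2 ++ [st.1] else st.2)
    = PySem.Chars.split₀.go (cs.map (fun c => if PySem.Chars.isdigit c then c else ' '))
        tmp.reverse num.reverse := by
  induction cs with
  | nil =>
    intro tmp num
    simp only [solutionLoop, List.map_nil, PySem.Chars.split₀.go]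
    by_cases h : tmp = []
    · subst h; simp
    · simp [h, List.isEmpty_iff]
  | cons c rest ih =>
    intro tmp num
    by_cases hd : PySem.Chars.isdigit c = true
    · simp only [solutionLoop, hd, if_true, List.map_cons, PySem.Chars.split₀.go,
        isdigit_not_isspace c hd]
      rw [ih (tmp ++ [c]) num]
      simp
    · simp only [solutionLoop, hd, if_false, Bool.false_eq_true, List.map_cons,
        PySem.Chars.split₀.go, isspace_space, if_true]
      by_cases h : tmp = []
      · subst h
        simpa using ih [] num
      · simp only [h, ne_eq, not_false_iff, if_true, List.isEmpty_iff]
        rw [ih [] (num ++ [tmp])]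
        simp [h]

theorem foldl_add_getD (l : List (List Char)) :
    l.foldl (fun answer i => answer + (PySem.Int.ofChars? i).getD 0) 0
    = (l.map (fun piece => (PySem.Int.ofChars? piece).getD 0)).sum :=
  PySem.List.foldl_add l (fun piece => (PySem.Int.ofChars? piece).getD 0) 0 |>.trans (by simp)

-- ===== VERDICT (by name: the statement is the Claim_ definition above) =====
theorem solution_spec : Claim_equal_solution := by
  intro s _
  unfold Spec_solution solution solution_alt
  rw [foldl_add_getD]
  have := loop_eq_go s.toList [] []
  simp only [List.reverse_nil] at this
  rw [this]
  rfl
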